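-- pv_equiv track=rewrite | github.com/vincent385/HackerRank | 1 Month Preparation Kit/Flipping Bits.py | solve
-- ===== SOURCE A (Python) =====
-- def solve(n):
--     flipped_bits = ""
--     bits = bin(n)[2:]
--
--     if len(bits) < 32:
--         bits = "0" * (32 - len(bits)) + bits
--
--     for bit in bits:
--         if int(bit) == 1:
--             flipped_bits += "0"
--         else:
--             flipped_bits += "1"
--     return flipped_bits
-- ===== SOURCE B (Python) =====
-- def solve(n):
--     w = max(32, n.bit_length())
--     return format((1 << w) - 1 - n, '0' + str(w) + 'b')
-- ===== Notes on version B (the rewrite author's own statement) =====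
-- stated objective: simpler
-- what changed: Replaces the character-by-character bit-flipping loop over a padded binary string with a closed-form arithmetic complement (2^w - 1 - n) formatted once as zero-padded binary.
import Mathlib
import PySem

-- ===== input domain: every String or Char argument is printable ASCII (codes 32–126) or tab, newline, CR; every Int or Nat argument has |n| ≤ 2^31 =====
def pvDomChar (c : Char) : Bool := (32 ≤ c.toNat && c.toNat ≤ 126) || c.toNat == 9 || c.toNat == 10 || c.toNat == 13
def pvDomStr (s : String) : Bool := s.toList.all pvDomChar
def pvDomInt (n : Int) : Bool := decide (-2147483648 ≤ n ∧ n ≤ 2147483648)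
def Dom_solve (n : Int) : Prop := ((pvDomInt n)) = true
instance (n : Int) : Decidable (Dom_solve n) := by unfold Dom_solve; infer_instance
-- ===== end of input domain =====

-- B replaces A's char-by-char flipping loop with a closed-form complement (2^w - 1 - n)
-- formatted once as zero-padded binary (objective: simpler). Equivalence is claimed for n ≥ 0.

-- minimal binary representation of a natural number, as bin(n)[2:] produces (MSB first, "0" for 0)
def binRep (n : Nat) : List Char :=
  if _ : n < 2 then [if n = 1 then '1' else '0']
  else binRep (n / 2) ++ [if n % 2 = 1 then '1' else '0']
termination_by n
decreasing_by omega

-- ===== PORT A =====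
-- loop body: int(bit) via PySem.Int.ofStr? ('?' is the unreachable ValueError path, excluded by Pre_)
def flipChar (c : Char) : Char :=
  match PySem.Int.ofStr? (String.mk [c]) with
  | some v => if v = 1 then '0' else '1'
  | none => '?'

def solve (n : Int) : String :=
  -- bits = bin(n)[2:]
  let bits := ((if n < 0 then ['-'] else []) ++ ['0', 'b'] ++ binRep n.natAbs).drop 2
  let bits := if bits.length < 32 then List.replicate (32 - bits.length) '0' ++ bits else bits
  -- flipped_bits accumulated left to right
  String.mk (bits.foldl (fun acc c => acc ++ [flipChar c]) [])

-- ===== PORT B =====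
-- n.bit_length() for n ≥ 0
def bitLen (n : Nat) : Nat := if n = 0 then 0 else n.log2 + 1

def solve_alt (n : Int) : String :=
  let w := max 32 (bitLen n.toNat)
  let v := (2 ^ w : Int) - 1 - n
  let ds := binRep v.toNat
  String.mk (List.replicate (w - ds.length) '0' ++ ds)

-- ===== PRECONDITION & SPEC =====
-- Pre_ excludes exactly n < 0, where A raises ValueError (int('b') on bin(n)[2:] = 'b…').
def Pre_solve (n : Int) : Prop := 0 ≤ n
instance (n : Int) : Decidable (Pre_solve n) := by unfold Pre_solve; infer_instance
def pvWitness_solve : Int := (5)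

def Spec_solve (n : Int) (out : String) : Prop := out = solve_alt n
instance (n : Int) (out : String) : Decidable (Spec_solve n out) := by unfold Spec_solve; infer_instance

-- ===== CLAIM (what is proved, stated in full; the proofs are below) =====
def Claim_equal_solve : Prop := ∀ (n : Int), Dom_solve n → Pre_solve n → Spec_solve n (solve n)

-- ===== LEMMAS AND PROOFS =====

-- fixed-width binary of n (MSB first), the common normal form of both ports
def toBin : Nat → Nat → List Char
  | 0, _ => []
  | w + 1, n => toBin w (n / 2) ++ [if n % 2 = 1 then '1' else '0']

theorem foldl_append_singleton (f : Char → Char) (l acc : List Char) :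
    l.foldl (fun a c => a ++ [f c]) acc = acc ++ l.map f := by
  induction l generalizing acc with
  | nil => simp
  | cons c t ih => simp [List.foldl, ih, List.append_assoc]

theorem toBin_zero (w : Nat) : toBin w 0 = List.replicate w '0' := by
  induction w with
  | zero => rfl
  | succ w ih => simp [toBin, ih, List.replicate_succ']

theorem length_binRep_le (w : Nat) (n : Nat) (hn : n < 2 ^ w) (hw : 0 < w) :
    (binRep n).length ≤ w := by
  induction w generalizing n with
  | zero => omega
  | succ w ih =>
    rw [binRep]
    split
    · simp
    · rename_i h
      have h2 : 2 ^ (w + 1) = 2 * 2 ^ w := by ring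
      have hw' : 0 < w := by
        by_contra hc
        have : w = 0 := by omega
        subst this; simp at hn; omega
      have := ih (n / 2) (by omega) hw'
      simp [List.length_append]
      omega

theorem pad_binRep_eq_toBin (w : Nat) (n : Nat) (hn : n < 2 ^ w) (hw : 0 < w) :
    List.replicate (w - (binRep n).length) '0' ++ binRep n = toBin w n := by
  induction w generalizing n with
  | zero => omega
  | succ w ih =>
    by_cases hsmall : n < 2
    · rw [binRep]
      simp only [hsmall, dif_pos]
      have hdiv : n / 2 = 0 := by omega
      have hmod : n % 2 = n := by omega
      simp [toBin, hdiv, hmod, toBin_zero]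
    · rw [binRep]
      simp only [hsmall]
      have h2 : 2 ^ (w + 1) = 2 * 2 ^ w := by ring
      have hw' : 0 < w := by
        by_contra hc
        have : w = 0 := by omega
        subst this; simp at hn; omega
      have hlt : n / 2 < 2 ^ w := by omega
      have hlen := length_binRep_le w (n / 2) hlt hw'
      rw [toBin, ← ih (n / 2) hlt hw']
      simp [List.length_append, List.append_assoc]

theorem flipChar_zero : flipChar '0' = '1' := by decide
theorem flipChar_one : flipChar '1' = '0' := by decide

theorem map_flip_toBin (w : Nat) (n : Nat) (hn : n < 2 ^ w) :
    (toBin w n).map flipChar = toBin w (2 ^ w - 1 - n) := by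
  induction w generalizing n with
  | zero => rfl
  | succ w ih =>
    have h2 : 2 ^ (w + 1) = 2 * 2 ^ w := by ring
    have hdiv : (2 ^ (w + 1) - 1 - n) / 2 = 2 ^ w - 1 - n / 2 := by omega
    have hmod : (2 ^ (w + 1) - 1 - n) % 2 = 1 - n % 2 := by omega
    rw [toBin, toBin, List.map_append, ih (n / 2) (by omega), hdiv, hmod]
    congr 1
    rcases Nat.mod_two_eq_zero_or_one n with h | h <;>
      simp [h, flipChar_zero, flipChar_one]

theorem bitLen_le (w : Nat) (n : Nat) (hn : n < 2 ^ w) : bitLen n ≤ w := by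
  unfold bitLen
  split
  · omega
  · rename_i h
    have := (Nat.log2_lt h).mpr hn
    omega

-- ===== VERDICT (by name: the statement is the Claim_ definition above) =====
theorem solve_spec : Claim_equal_solve := by
  intro n hdom hpre
  unfold Pre_solve at hpre
  have hub : n ≤ 2147483648 := (of_decide_eq_true hdom).2
  unfold Spec_solve solve solve_alt
  have hnn : ¬ n < 0 := by omega
  set m := n.natAbs with hm
  have htn : n.toNat = m := by omega
  have hm32 : m < 2 ^ 32 := by omega
  have hw : max 32 (bitLen m) = 32 := Nat.max_eq_left (bitLen_le 32 m hm32)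
  have hbits : List.drop 2 ((if n < 0 then ['-'] else []) ++ ['0', 'b'] ++ binRep m)
      = binRep m := by simp [hnn]
  simp only [htn, hw, hbits]
  have hv : ((2 ^ 32 : Int) - 1 - n).toNat = 2 ^ 32 - 1 - m := by omega
  rw [hv]
  -- normalise A's conditional padding to unconditional padding
  have hlen := length_binRep_le 32 m hm32 (by omega)
  have hpadA : (if (binRep m).length < 32
        then List.replicate (32 - (binRep m).length) '0' ++ binRep m else binRep m)
      = List.replicate (32 - (binRep m).length) '0' ++ binRep m := by
    split
    · rfl
    · have : (binRep m).length = 32 := by omega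
      simp [this]
  rw [hpadA, foldl_append_singleton, List.nil_append,
    pad_binRep_eq_toBin 32 m hm32 (by omega), map_flip_toBin 32 m hm32,
    pad_binRep_eq_toBin 32 (2 ^ 32 - 1 - m) (by omega) (by omega)]
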